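-- pv_equiv track=rewrite | github.com/PenugurthiNikhil/Python-GUI-Project | PROJECT.py | Dconvert
-- ===== SOURCE A (Python) =====
-- def Dconvert(binary):
-- 	binary1 = binary
-- 	decimal, i, n = 0, 0, 0
-- 	while(binary != 0):
-- 		dec = binary % 10
-- 		decimal = decimal + dec * pow(2, i)
-- 		binary = binary//10
-- 		i += 1
-- 	return decimal
-- ===== SOURCE B (Python) =====
-- def Dconvert(binary):
--     # Phase 1: collect the decimal digits, least significant first.
--     digits = []
--     while binary != 0:
--         digits.append(binary % 10)
--         binary //= 10
--     # Phase 2: Horner fold over the digits, most significant first.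
--     decimal = 0
--     for d in reversed(digits):
--         decimal = decimal * 2 + d
--     return decimal
-- ===== Notes on version B (the rewrite author's own statement) =====
-- stated objective: alternative
-- what changed: Replaces A's single LSB-first loop accumulating digit*2^i with a power counter by two staged passes: first build the digit list with divmod, then a separate MSB-first Horner fold (decimal = decimal*2 + d) over the reversed list, with no exponent bookkeeping.
import Mathlib
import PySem

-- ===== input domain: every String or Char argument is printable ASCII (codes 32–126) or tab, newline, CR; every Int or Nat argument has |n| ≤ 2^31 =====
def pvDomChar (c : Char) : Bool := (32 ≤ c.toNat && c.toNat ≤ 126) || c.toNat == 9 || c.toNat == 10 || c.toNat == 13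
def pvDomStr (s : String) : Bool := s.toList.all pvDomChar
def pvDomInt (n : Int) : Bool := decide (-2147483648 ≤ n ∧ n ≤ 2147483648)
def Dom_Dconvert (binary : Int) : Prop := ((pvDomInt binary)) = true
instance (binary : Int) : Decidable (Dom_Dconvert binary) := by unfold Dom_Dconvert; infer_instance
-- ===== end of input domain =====

-- B splits A's single power-accumulating loop into two passes: collect the digit list, then an MSB-first Horner fold over its reverse (alternative decomposition, same cost). Pre_ restricts to binary >= 0 (A's loop never terminates on negatives).


-- ===== PORT A =====
-- the Python while-loop 'while binary != 0', made total with a fuel parameter (binary.toNat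
-- steps always suffice on the non-negative inputs of Pre_; on binary < 0 Python never terminates).
def DconvertLoop : Nat → Int → Int → Nat → Int
  | 0, _, decimal, _ => decimal
  | fuel + 1, binary, decimal, i =>
    if 0 < binary then
      DconvertLoop fuel (PySem.Int.floordiv binary 10)
        (decimal + PySem.Int.mod binary 10 * 2 ^ i) (i + 1)
    else decimal

def Dconvert (binary : Int) : Int := DconvertLoop binary.toNat binary 0 0

-- ===== PORT B =====
-- phase 1: 'while binary != 0: digits.append(binary % 10); binary //= 10', fuel as above.
def DconvertDigits : Nat → Int → List Int → List Int
  | 0, _, digits => digits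
  | fuel + 1, binary, digits =>
    if 0 < binary then
      DconvertDigits fuel (PySem.Int.floordiv binary 10) (digits ++ [PySem.Int.mod binary 10])
    else digits

-- phase 2: 'for d in reversed(digits): decimal = decimal * 2 + d'
def Dconvert_alt (binary : Int) : Int :=
  (DconvertDigits binary.toNat binary []).reverse.foldl (fun decimal d => decimal * 2 + d) 0

-- ===== PRECONDITION & SPEC =====
-- Pre_ excludes negative inputs: there A's while-loop never terminates (binary//10 stalls at -1),
-- so A returns on exactly the non-negative integers.
def Pre_Dconvert (binary : Int) : Prop := 0 ≤ binary
instance (binary : Int) : Decidable (Pre_Dconvert binary) := by unfold Pre_Dconvert; infer_instance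
def pvWitness_Dconvert : Int := (110101)

def Spec_Dconvert (binary : Int) (out : Int) : Prop := out = Dconvert_alt binary
instance (binary : Int) (out : Int) : Decidable (Spec_Dconvert binary out) := by unfold Spec_Dconvert; infer_instance

-- ===== CLAIM (what is proved, stated in full; the proofs are below) =====
def Claim_equal_Dconvert : Prop := ∀ (binary : Int), Dom_Dconvert binary → Pre_Dconvert binary → Spec_Dconvert binary (Dconvert binary)

-- ===== LEMMAS AND PROOFS =====

-- phase 1 only appends to its accumulator
lemma DconvertDigits_acc (fuel : Nat) :
    ∀ (b : Int) (acc : List Int),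
      DconvertDigits fuel b acc = acc ++ DconvertDigits fuel b [] := by
  induction fuel with
  | zero => intro b acc; simp [DconvertDigits]
  | succ fuel ih =>
    intro b acc
    by_cases h : 0 < b
    · simp only [DconvertDigits, h, if_pos]
      rw [ih _ (acc ++ [PySem.Int.mod b 10]), ih _ ([] ++ [PySem.Int.mod b 10])]
      simp
    · simp [DconvertDigits, h]

-- any sufficient fuel computes the same digit list
lemma DconvertDigits_fuel :
    ∀ (f1 : Nat) (b : Int) (f2 : Nat), b.toNat ≤ f1 → b.toNat ≤ f2 →
      DconvertDigits f1 b [] = DconvertDigits f2 b [] := by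
  intro f1
  induction f1 with
  | zero =>
    intro b f2 h1 _
    have hb : ¬ 0 < b := by omega
    cases f2 with
    | zero => rfl
    | succ f2 => simp [DconvertDigits, hb]
  | succ f1 ih =>
    intro b f2 h1 h2
    by_cases hb : 0 < b
    · have hq : PySem.Int.floordiv b 10 = b / 10 :=
        PySem.Int.floordiv_eq_ediv_of_pos (by omega)
      cases f2 with
      | zero => omega
      | succ f2 =>
        simp only [DconvertDigits, hb, if_pos]
        rw [DconvertDigits_acc f1, DconvertDigits_acc f2,
          ih (PySem.Int.floordiv b 10) f2 (by rw [hq]; omega) (by rw [hq]; omega)]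
    · cases f2 with
      | zero => simp [DconvertDigits, hb]
      | succ f2 => simp [DconvertDigits, hb]

lemma Dconvert_alt_zero : Dconvert_alt 0 = 0 := by
  simp [Dconvert_alt, DconvertDigits]

-- B's value satisfies the Horner recurrence on a positive input
lemma Dconvert_alt_pos (b : Int) (h : 0 < b) :
    Dconvert_alt b = Dconvert_alt (PySem.Int.floordiv b 10) * 2 + PySem.Int.mod b 10 := by
  have hq : PySem.Int.floordiv b 10 = b / 10 :=
    PySem.Int.floordiv_eq_ediv_of_pos (by omega)
  obtain ⟨t, ht⟩ : ∃ t, b.toNat = t + 1 := ⟨b.toNat - 1, by omega⟩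
  unfold Dconvert_alt
  rw [ht]
  simp only [DconvertDigits, h, if_pos]
  rw [DconvertDigits_acc t, List.nil_append,
    DconvertDigits_fuel t (PySem.Int.floordiv b 10) (PySem.Int.floordiv b 10).toNat
      (by rw [hq]; omega) le_rfl]
  simp [List.foldl_append]

-- A's loop computes decimal + 2^i * (B's value of the remaining digits)
lemma DconvertLoop_horner :
    ∀ (fuel : Nat) (b d : Int) (i : Nat), 0 ≤ b → b.toNat ≤ fuel →
      DconvertLoop fuel b d i = d + 2 ^ i * Dconvert_alt b := by
  intro fuel
  induction fuel with
  | zero =>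
    intro b d i hb hn
    have hb0 : b = 0 := by omega
    subst hb0
    simp [DconvertLoop, Dconvert_alt_zero]
  | succ fuel ih =>
    intro b d i hb hn
    by_cases h : 0 < b
    · have hq : PySem.Int.floordiv b 10 = b / 10 :=
        PySem.Int.floordiv_eq_ediv_of_pos (by omega)
      simp only [DconvertLoop, h, if_pos]
      rw [ih (PySem.Int.floordiv b 10) _ (i + 1) (by rw [hq]; omega) (by rw [hq]; omega),
        Dconvert_alt_pos b h]
      ring
    · have hb0 : b = 0 := by omega
      subst hb0
      simp [DconvertLoop, Dconvert_alt_zero]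

-- ===== VERDICT (by name: the statement is the Claim_ definition above) =====
theorem Dconvert_spec : Claim_equal_Dconvert := by
  intro binary _ hpre
  unfold Spec_Dconvert Dconvert
  rw [DconvertLoop_horner binary.toNat binary 0 0 hpre le_rfl]
  simp
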